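-- pv_equiv track=rewrite | github.com/freshmea/AxDxConsultant | llm_wiki/code_query.py | resolve_node_ref
-- ===== SOURCE A (Python) =====
-- from typing import Dict, List, Tuple
--
-- def _node_map(graph: Dict[str, object]) -> Dict[str, Dict[str, object]]:
--     return {str(node["id"]): node for node in graph.get("nodes", [])}  # type: ignore[arg-type]
--
-- def resolve_node_ref(graph: Dict[str, object], node_ref: str) -> str | None:
--     nodes = _node_map(graph)
--     if node_ref in nodes:
--         return node_ref
--     query = node_ref.lower().strip()
--     exact_candidates = []
--     fuzzy_candidates = []
--     for node_id, node in nodes.items():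
--         label = str(node.get("label", "")).lower()
--         path = str(node.get("path", "")).lower()
--         if query == label or query == path:
--             exact_candidates.append(node_id)
--             continue
--         if query in label or query in path:
--             fuzzy_candidates.append(node_id)
--
--     def _priority(node_id: str) -> tuple[int, int, str]:
--         node = nodes[node_id]
--         kind = str(node.get("kind", ""))
--         kind_rank = {
--             "function": 0,
--             "class": 0,
--             "async_function": 0,
--             "module": 1,
--             "import": 2,
--             "symbol_ref": 3,
--         }.get(kind, 4)
--         path = str(node.get("path", ""))
--         path_rank = 0 if path.startswith("llm_wiki/") else 1
--         return (kind_rank, path_rank, str(node.get("label", "")))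
--
--     if exact_candidates:
--         exact_candidates.sort(key=_priority)
--         return exact_candidates[0]
--     if fuzzy_candidates:
--         fuzzy_candidates.sort(key=_priority)
--         return fuzzy_candidates[0]
--     return None
-- ===== SOURCE B (Python) =====
-- def resolve_node_ref(graph, node_ref):
--     nodes = {str(node["id"]): node for node in graph.get("nodes", [])}
--     if node_ref in nodes:
--         return node_ref
--     query = node_ref.lower().strip()
--     kind_ranks = {"function": 0, "class": 0, "async_function": 0,
--                   "module": 1, "import": 2, "symbol_ref": 3}
--     best = None  # (key, node_id): running first-minimum over one pass
--     for node_id, node in nodes.items():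
--         label = str(node.get("label", "")).lower()
--         path = str(node.get("path", "")).lower()
--         if query == label or query == path:
--             tier = 0
--         elif query in label or query in path:
--             tier = 1
--         else:
--             continue
--         raw_path = str(node.get("path", ""))
--         key = (tier,
--                kind_ranks.get(str(node.get("kind", "")), 4),
--                0 if raw_path.startswith("llm_wiki/") else 1,
--                str(node.get("label", "")))
--         if best is None or key < best[0]:
--             best = (key, node_id)
--     return best[1] if best is not None else None
-- ===== Notes on version B (the rewrite author's own statement) =====
-- stated objective: alternative
-- what changed: Replaced the two exact/fuzzy candidate lists and the two stable sorts by a single pass over the node map that keeps a running first-minimum of a lexicographic key (tier, kind_rank, path_rank, label), where tier 0 = exact match and tier 1 = substring match.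
-- outside the precondition, e.g. on resolve_node_ref({'nodes': [{'label': 'x'}]}, 'x'): A raises KeyError, B raises KeyError
import Mathlib
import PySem

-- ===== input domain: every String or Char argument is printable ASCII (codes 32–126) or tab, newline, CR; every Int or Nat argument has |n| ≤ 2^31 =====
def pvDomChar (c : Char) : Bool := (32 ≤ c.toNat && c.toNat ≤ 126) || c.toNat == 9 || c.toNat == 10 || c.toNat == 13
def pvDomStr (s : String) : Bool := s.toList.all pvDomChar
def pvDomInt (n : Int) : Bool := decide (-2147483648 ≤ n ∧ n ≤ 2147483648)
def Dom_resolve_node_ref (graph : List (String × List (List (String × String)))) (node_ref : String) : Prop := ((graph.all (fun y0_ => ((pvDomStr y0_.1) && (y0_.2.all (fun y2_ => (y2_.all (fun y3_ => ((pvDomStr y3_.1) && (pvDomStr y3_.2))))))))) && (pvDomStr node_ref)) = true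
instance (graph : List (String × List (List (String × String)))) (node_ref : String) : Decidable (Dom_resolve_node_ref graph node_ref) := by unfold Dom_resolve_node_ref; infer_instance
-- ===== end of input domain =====

-- B replaces A's two candidate lists + two stable sorts by one pass keeping a running
-- first-minimum of a lexicographic key (tier, kind_rank, path_rank, label); return value only.

-- ===== PORT A =====
-- helper _node_map: {str(node["id"]): node for node in graph.get("nodes", [])}
def pvNodeMap (graph : List (String × List (List (String × String)))) :
    PySem.Dict String (List (String × String)) :=
  (PySem.Dict.getD (PySem.Dict.mk graph) "nodes" []).foldl
    (fun d node => d.insert (((PySem.Dict.mk node).get? "id").getD "") node) PySem.Dict.empty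

-- helper _priority (closure over nodes); Python tuple (int, int, str) ordered lexicographically
def pvPriorityA (nodes : PySem.Dict String (List (String × String))) (node_id : String) :
    ℤ ×ₗ ℤ ×ₗ String :=
  toLex (PySem.Dict.getD (PySem.Dict.mk
      [("function", (0:ℤ)), ("class", 0), ("async_function", 0),
       ("module", 1), ("import", 2), ("symbol_ref", 3)])
      (PySem.Dict.getD (PySem.Dict.mk ((nodes.get? node_id).getD [])) "kind" "") 4,
    toLex ((if PySem.Str.startswith (PySem.Dict.getD (PySem.Dict.mk ((nodes.get? node_id).getD [])) "path" "") "llm_wiki/" then (0:ℤ) else 1),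
      PySem.Dict.getD (PySem.Dict.mk ((nodes.get? node_id).getD [])) "label" ""))

-- body of A's for-loop: classify one (node_id, node) item into exact/fuzzy candidate lists
def pvStepA (query : String) (acc : List String × List String)
    (it : String × List (String × String)) : List String × List String :=
  if query == PySem.Str.lower (PySem.Dict.getD (PySem.Dict.mk it.2) "label" "")
      || query == PySem.Str.lower (PySem.Dict.getD (PySem.Dict.mk it.2) "path" "") then
    (acc.1 ++ [it.1], acc.2)
  else if PySem.Str.isIn query (PySem.Str.lower (PySem.Dict.getD (PySem.Dict.mk it.2) "label" ""))
      || PySem.Str.isIn query (PySem.Str.lower (PySem.Dict.getD (PySem.Dict.mk it.2) "path" "")) then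
    (acc.1, acc.2 ++ [it.1])
  else acc

def resolve_node_ref (graph : List (String × List (List (String × String)))) (node_ref : String) : Option String :=
  if (pvNodeMap graph).contains node_ref then some node_ref
  else
    match PySem.List.sorted
        ((pvNodeMap graph).items.foldl (pvStepA (PySem.Str.strip (PySem.Str.lower node_ref))) ([], [])).1
        (pvPriorityA (pvNodeMap graph)) with
    | x :: _ => some x
    | [] =>
      match PySem.List.sorted
          ((pvNodeMap graph).items.foldl (pvStepA (PySem.Str.strip (PySem.Str.lower node_ref))) ([], [])).2
          (pvPriorityA (pvNodeMap graph)) with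
      | x :: _ => some x
      | [] => none

-- ===== PORT B =====
-- key tail (kind_rank, path_rank, label), computed directly from the node dict
def pvKeyTail (node : List (String × String)) : ℤ ×ₗ ℤ ×ₗ String :=
  toLex (PySem.Dict.getD (PySem.Dict.mk
      [("function", (0:ℤ)), ("class", 0), ("async_function", 0),
       ("module", 1), ("import", 2), ("symbol_ref", 3)])
      (PySem.Dict.getD (PySem.Dict.mk node) "kind" "") 4,
    toLex ((if PySem.Str.startswith (PySem.Dict.getD (PySem.Dict.mk node) "path" "") "llm_wiki/" then (0:ℤ) else 1),
      PySem.Dict.getD (PySem.Dict.mk node) "label" ""))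

-- tier + key of one node, none = not a candidate
def pvKeyB (query : String) (node : List (String × String)) :
    Option (ℤ ×ₗ ℤ ×ₗ ℤ ×ₗ String) :=
  if query == PySem.Str.lower (PySem.Dict.getD (PySem.Dict.mk node) "label" "")
      || query == PySem.Str.lower (PySem.Dict.getD (PySem.Dict.mk node) "path" "") then
    some (toLex ((0:ℤ), pvKeyTail node))
  else if PySem.Str.isIn query (PySem.Str.lower (PySem.Dict.getD (PySem.Dict.mk node) "label" ""))
      || PySem.Str.isIn query (PySem.Str.lower (PySem.Dict.getD (PySem.Dict.mk node) "path" "")) then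
    some (toLex ((1:ℤ), pvKeyTail node))
  else none

-- body of B's for-loop: keep the first (key, node_id) with minimal key
def pvStepB (query : String) (best : Option ((ℤ ×ₗ ℤ ×ₗ ℤ ×ₗ String) × String))
    (it : String × List (String × String)) : Option ((ℤ ×ₗ ℤ ×ₗ ℤ ×ₗ String) × String) :=
  match pvKeyB query it.2 with
  | none => best
  | some k =>
    match best with
    | none => some (k, it.1)
    | some b => if k < b.1 then some (k, it.1) else best

def resolve_node_ref_alt (graph : List (String × List (List (String × String)))) (node_ref : String) : Option String :=
  if (pvNodeMap graph).contains node_ref then some node_ref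
  else
    ((pvNodeMap graph).items.foldl (pvStepB (PySem.Str.strip (PySem.Str.lower node_ref))) none).map
      (fun b => b.2)

-- ===== PRECONDITION & SPEC =====
-- Pre_ excludes graphs with a node lacking an "id" key, on which Python A raises KeyError.
def Pre_resolve_node_ref (graph : List (String × List (List (String × String)))) (node_ref : String) : Prop :=
  ∀ node ∈ PySem.Dict.getD (PySem.Dict.mk graph) "nodes" [], (PySem.Dict.mk node).contains "id" = true
instance (graph : List (String × List (List (String × String)))) (node_ref : String) : Decidable (Pre_resolve_node_ref graph node_ref) := by unfold Pre_resolve_node_ref; infer_instance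

def pvWitness_resolve_node_ref : (List (String × List (List (String × String)))) × String :=
  ([("nodes", [[("id", "n1"), ("label", "foo")]])], "foo")

def Spec_resolve_node_ref (graph : List (String × List (List (String × String)))) (node_ref : String) (out : Option String) : Prop := out = resolve_node_ref_alt graph node_ref
instance (graph : List (String × List (List (String × String)))) (node_ref : String) (out : Option String) : Decidable (Spec_resolve_node_ref graph node_ref out) := by unfold Spec_resolve_node_ref; infer_instance

-- ===== CLAIM (what is proved, stated in full; the proofs are below) =====
def Claim_equal_resolve_node_ref : Prop := ∀ (graph : List (String × List (List (String × String)))) (node_ref : String), Dom_resolve_node_ref graph node_ref → Pre_resolve_node_ref graph node_ref → Spec_resolve_node_ref graph node_ref (resolve_node_ref graph node_ref)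

-- ===== LEMMAS AND PROOFS =====

def pvMinStep {α κ : Type} [LT κ] [DecidableLT κ] (k : α → κ) (acc : Option α) (x : α) : Option α :=
  match acc with
  | none => some x
  | some b => if k x < k b then some x else acc

def pvFmin {α κ : Type} [LT κ] [DecidableLT κ] (k : α → κ) (l : List α) : Option α :=
  l.foldl (pvMinStep k) none

theorem pvInsertBy_head {α κ : Type} [LT κ] [DecidableLT κ] (k : α → κ) (x : α) (acc : List α) :
    (PySem.List.insertBy (fun a b => decide (k a < k b)) x acc).head? = pvMinStep k acc.head? x := by
  cases acc with
  | nil => simp [PySem.List.insertBy, pvMinStep]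
  | cons y ys =>
    simp only [PySem.List.insertBy, pvMinStep, List.head?_cons]
    split_ifs with h <;> simp_all

theorem pvFoldl_insertBy_head {α κ : Type} [LT κ] [DecidableLT κ] (k : α → κ) :
    ∀ (l : List α) (acc : List α),
      (l.foldl (fun a x => PySem.List.insertBy (fun a b => decide (k a < k b)) x a) acc).head?
        = l.foldl (pvMinStep k) acc.head? := by
  intro l
  induction l with
  | nil => intro acc; rfl
  | cons x xs ih =>
    intro acc
    simp only [List.foldl_cons]
    rw [ih, pvInsertBy_head]

theorem pvSorted_head {α κ : Type} [LinearOrder κ] (k : α → κ) (l : List α) :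
    (PySem.List.sorted l k).head? = pvFmin k l := by
  rw [PySem.List.sorted_eq_foldl_insertBy]
  exact pvFoldl_insertBy_head k l []

theorem pvFmin_map {α β κ : Type} [LT κ] [DecidableLT κ] (k : β → κ) (f : α → β) (l : List α) :
    pvFmin k (l.map f) = (pvFmin (fun x => k (f x)) l).map f := by
  unfold pvFmin
  rw [List.foldl_map]
  suffices h : ∀ (acc : Option α),
      l.foldl (fun acc x => pvMinStep k acc (f x)) (acc.map f)
        = (l.foldl (pvMinStep (fun x => k (f x))) acc).map f by
    exact h none
  induction l with
  | nil => intro acc; rfl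
  | cons x xs ih =>
    intro acc
    simp only [List.foldl_cons]
    rw [← ih]
    congr 1
    cases acc with
    | none => rfl
    | some b => simp only [pvMinStep, Option.map_some]; split_ifs <;> rfl

theorem pvFoldl_minStep_congr {α κ1 κ2 : Type} [LT κ1] [DecidableLT κ1] [LT κ2] [DecidableLT κ2]
    (k1 : α → κ1) (k2 : α → κ2) (S : List α)
    (h : ∀ a ∈ S, ∀ b ∈ S, (k1 a < k1 b ↔ k2 a < k2 b)) :
    ∀ (l : List α), (∀ x ∈ l, x ∈ S) → ∀ (acc : Option α), (∀ a, acc = some a → a ∈ S) →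
      l.foldl (pvMinStep k1) acc = l.foldl (pvMinStep k2) acc := by
  intro l
  induction l with
  | nil => intro _ acc _; rfl
  | cons x xs ih =>
    intro hl acc hacc
    have hx : x ∈ S := hl x (by simp)
    simp only [List.foldl_cons]
    have hstep : pvMinStep k1 acc x = pvMinStep k2 acc x := by
      cases acc with
      | none => rfl
      | some b =>
        have hb : b ∈ S := hacc b rfl
        simp only [pvMinStep]
        rw [if_congr (h x hx b hb) rfl rfl]
    rw [hstep]
    refine ih (fun y hy => hl y (by simp [hy])) _ ?_
    intro a ha
    cases acc with
    | none =>
      simp only [pvMinStep] at ha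
      injection ha with ha'
      exact ha' ▸ hx
    | some b =>
      simp only [pvMinStep] at ha
      split_ifs at ha <;> simp_all [hacc b rfl]

theorem pvFmin_congr {α κ1 κ2 : Type} [LT κ1] [DecidableLT κ1] [LT κ2] [DecidableLT κ2]
    (k1 : α → κ1) (k2 : α → κ2) (l : List α)
    (h : ∀ a ∈ l, ∀ b ∈ l, (k1 a < k1 b ↔ k2 a < k2 b)) :
    pvFmin k1 l = pvFmin k2 l :=
  pvFoldl_minStep_congr k1 k2 l h l (fun _ hx => hx) none (by simp)

theorem pvFoldl_skip {α β : Type} (f : α → Option β) (G : Option β → β → Option β) :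
    ∀ (l : List α) (a : Option β),
      l.foldl (fun acc x => (f x).elim acc (fun y => G acc y)) a
        = (l.filterMap f).foldl G a := by
  intro l
  induction l with
  | nil => intro a; rfl
  | cons x xs ih =>
    intro a
    simp only [List.foldl_cons, List.filterMap_cons]
    cases hf : f x with
    | none => simp [ih]
    | some y => simp [ih]

-- the two classification conditions of the loops, named for the proofs
def pvExact (query : String) (node : List (String × String)) : Bool :=
  query == PySem.Str.lower (PySem.Dict.getD (PySem.Dict.mk node) "label" "")
    || query == PySem.Str.lower (PySem.Dict.getD (PySem.Dict.mk node) "path" "")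

def pvSub (query : String) (node : List (String × String)) : Bool :=
  PySem.Str.isIn query (PySem.Str.lower (PySem.Dict.getD (PySem.Dict.mk node) "label" ""))
    || PySem.Str.isIn query (PySem.Str.lower (PySem.Dict.getD (PySem.Dict.mk node) "path" ""))

theorem pvKeyB_eq (query : String) (node : List (String × String)) :
    pvKeyB query node
      = if pvExact query node then some (toLex ((0:ℤ), pvKeyTail node))
        else if pvSub query node then some (toLex ((1:ℤ), pvKeyTail node))
        else none := rfl

theorem pvStepA_eq (query : String) (acc : List String × List String)
    (it : String × List (String × String)) :
    pvStepA query acc it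
      = if pvExact query it.2 then (acc.1 ++ [it.1], acc.2)
        else if pvSub query it.2 then (acc.1, acc.2 ++ [it.1])
        else acc := rfl

-- tier decomposition: with key (t x, p x) and t ∈ {0,1}, folding a mixed list equals
-- folding the tier-0 sublist if it is non-empty, else the tier-1 sublist
theorem pvTier_keep0 {α κ : Type} [LinearOrder κ] (t : α → ℤ) (p : α → κ) :
    ∀ (l : List α) (b : α), t b = 0 → (∀ x ∈ l, t x = 0 ∨ t x = 1) →
      l.foldl (pvMinStep (fun x => toLex (t x, p x))) (some b)
        = (l.filter (fun x => decide (t x = 0))).foldl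
            (pvMinStep (fun x => toLex (t x, p x))) (some b) := by
  intro l
  induction l with
  | nil => intro b _ _; rfl
  | cons x xs ih =>
    intro b hb hl
    have hxs := fun y hy => hl y (List.mem_cons_of_mem _ hy)
    simp only [List.foldl_cons, List.filter_cons]
    rcases hl x (by simp) with h0 | h1
    · rw [if_pos (by simp [h0])]
      simp only [List.foldl_cons, pvMinStep]
      split_ifs with h
      · exact ih x h0 hxs
      · exact ih b hb hxs
    · have hlt : ¬ ((fun x => toLex (t x, p x)) x < (fun x => toLex (t x, p x)) b) := by
        simp only
        rw [Prod.Lex.toLex_lt_toLex, hb, h1]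
        rintro (h | ⟨h, -⟩) <;> norm_num at h
      rw [if_neg (by simp [h1])]
      simp only [pvMinStep, if_neg hlt]
      exact ih b hb hxs

theorem pvTier_split {α κ : Type} [LinearOrder κ] (t : α → ℤ) (p : α → κ) :
    ∀ (l : List α) (acc : Option α),
      (acc = none ∨ ∃ b, acc = some b ∧ t b = 1) → (∀ x ∈ l, t x = 0 ∨ t x = 1) →
      l.foldl (pvMinStep (fun x => toLex (t x, p x))) acc
        = if (l.filter (fun x => decide (t x = 0))) = []
          then (l.filter (fun x => decide (t x = 1))).foldl (pvMinStep (fun x => toLex (t x, p x))) acc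
          else (l.filter (fun x => decide (t x = 0))).foldl (pvMinStep (fun x => toLex (t x, p x))) none := by
  intro l
  induction l with
  | nil =>
    intro acc _ _
    simp only [List.filter_nil]
    rw [if_pos trivial]
  | cons x xs ih =>
    intro acc hacc hl
    have hxs := fun y hy => hl y (List.mem_cons_of_mem _ hy)
    rcases hl x (by simp) with h0 | h1
    · have hf0 : List.filter (fun y => decide (t y = 0)) (x :: xs)
          = x :: List.filter (fun y => decide (t y = 0)) xs := by
        rw [List.filter_cons, if_pos (by simp [h0])]
      have hstep : pvMinStep (fun x => toLex (t x, p x)) acc x = some x := by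
        rcases hacc with rfl | ⟨b, rfl, hb⟩
        · rfl
        · simp only [pvMinStep]
          rw [if_pos]
          show (toLex (t x, p x) : ℤ ×ₗ κ) < toLex (t b, p b)
          rw [Prod.Lex.toLex_lt_toLex, h0, hb]
          exact Or.inl (by norm_num)
      rw [List.foldl_cons, hstep, hf0, if_neg (List.cons_ne_nil _ _), List.foldl_cons]
      rw [pvTier_keep0 t p xs x h0 hxs]
      rfl
    · have hf0 : List.filter (fun y => decide (t y = 0)) (x :: xs)
          = List.filter (fun y => decide (t y = 0)) xs := by
        rw [List.filter_cons, if_neg (by simp [h1])]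
      have hf1 : List.filter (fun y => decide (t y = 1)) (x :: xs)
          = x :: List.filter (fun y => decide (t y = 1)) xs := by
        rw [List.filter_cons, if_pos (by simp [h1])]
      have hacc' : (pvMinStep (fun x => toLex (t x, p x)) acc x) = none
          ∨ ∃ b, pvMinStep (fun x => toLex (t x, p x)) acc x = some b ∧ t b = 1 := by
        rcases hacc with rfl | ⟨b, rfl, hb⟩
        · exact Or.inr ⟨x, rfl, h1⟩
        · simp only [pvMinStep]
          split_ifs
          · exact Or.inr ⟨x, rfl, h1⟩
          · exact Or.inr ⟨b, rfl, hb⟩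
      rw [List.foldl_cons, ih _ hacc' hxs, hf0, hf1]
      by_cases he : List.filter (fun y => decide (t y = 0)) xs = []
      · rw [if_pos he, if_pos he, List.foldl_cons]
      · rw [if_neg he, if_neg he]

theorem pvTier_split_pair {σ κ : Type} [LinearOrder κ] (l : List ((ℤ ×ₗ κ) × σ))
    (hl : ∀ x ∈ l, (ofLex x.1).1 = 0 ∨ (ofLex x.1).1 = 1) :
    pvFmin Prod.fst l
      = if (l.filter (fun x => decide ((ofLex x.1).1 = 0))) = []
        then pvFmin Prod.fst (l.filter (fun x => decide ((ofLex x.1).1 = 1)))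
        else pvFmin Prod.fst (l.filter (fun x => decide ((ofLex x.1).1 = 0))) := by
  have h := pvTier_split (fun x : (ℤ ×ₗ κ) × σ => (ofLex x.1).1)
    (fun x : (ℤ ×ₗ κ) × σ => (ofLex x.1).2) l none (Or.inl rfl) hl
  exact h

-- A's loop produces the exact / fuzzy candidate id lists as filters of the items
theorem pvA_fold (q : String) :
    ∀ (L : List (String × List (String × String))) (e f : List String),
      L.foldl (pvStepA q) (e, f)
        = (e ++ (L.filter (fun it => pvExact q it.2)).map Prod.fst,
           f ++ (L.filter (fun it => !pvExact q it.2 && pvSub q it.2)).map Prod.fst) := by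
  intro L
  induction L with
  | nil => intro e f; simp
  | cons x xs ih =>
    intro e f
    simp only [List.foldl_cons, pvStepA_eq, List.filter_cons]
    by_cases hE : pvExact q x.2
    · simp [hE, ih, List.append_assoc]
    · by_cases hF : pvSub q x.2
      · simp [hE, hF, ih, List.append_assoc]
      · simp [hE, hF, ih]

-- B's candidate list, filtered to one tier, is A's filtered item list with its key attached
theorem pvCand0 (q : String) :
    ∀ (L : List (String × List (String × String))),
      ((L.filterMap (fun it => (pvKeyB q it.2).map (fun k => (k, it.1)))).filter
          (fun pr => decide ((ofLex pr.1).1 = 0)))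
        = (L.filter (fun it => pvExact q it.2)).map
            (fun it => (toLex ((0:ℤ), pvKeyTail it.2), it.1)) := by
  intro L
  induction L with
  | nil => rfl
  | cons x xs ih =>
    by_cases hE : pvExact q x.2 = true
    · have hfx : Option.map (fun k => (k, x.1)) (pvKeyB q x.2)
          = some ((toLex ((0:ℤ), pvKeyTail x.2) : ℤ ×ₗ ℤ ×ₗ ℤ ×ₗ String), x.1) := by
        rw [pvKeyB_eq, if_pos hE]; rfl
      have hcons : List.filterMap (fun it => Option.map (fun k => (k, it.1)) (pvKeyB q it.2)) (x :: xs)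
          = ((toLex ((0:ℤ), pvKeyTail x.2) : ℤ ×ₗ ℤ ×ₗ ℤ ×ₗ String), x.1)
            :: List.filterMap (fun it => Option.map (fun k => (k, it.1)) (pvKeyB q it.2)) xs := by
        simp only [List.filterMap_cons, hfx]
      rw [hcons, List.filter_cons, List.filter_cons, if_pos hE, if_pos (by simp), List.map_cons, ih]
    · by_cases hF : pvSub q x.2 = true
      · have hfx : Option.map (fun k => (k, x.1)) (pvKeyB q x.2)
            = some ((toLex ((1:ℤ), pvKeyTail x.2) : ℤ ×ₗ ℤ ×ₗ ℤ ×ₗ String), x.1) := by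
          rw [pvKeyB_eq, if_neg hE, if_pos hF]; rfl
        have hcons : List.filterMap (fun it => Option.map (fun k => (k, it.1)) (pvKeyB q it.2)) (x :: xs)
            = ((toLex ((1:ℤ), pvKeyTail x.2) : ℤ ×ₗ ℤ ×ₗ ℤ ×ₗ String), x.1)
              :: List.filterMap (fun it => Option.map (fun k => (k, it.1)) (pvKeyB q it.2)) xs := by
          simp only [List.filterMap_cons, hfx]
        rw [hcons, List.filter_cons, List.filter_cons, if_neg (by simp), if_neg hE, ih]
      · have hfx : Option.map (fun k => (k, x.1)) (pvKeyB q x.2) = none := by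
          rw [pvKeyB_eq, if_neg hE, if_neg hF]; rfl
        have hcons : List.filterMap (fun it => Option.map (fun k => (k, it.1)) (pvKeyB q it.2)) (x :: xs)
            = List.filterMap (fun it => Option.map (fun k => (k, it.1)) (pvKeyB q it.2)) xs := by
          simp only [List.filterMap_cons, hfx]
        rw [hcons, List.filter_cons, if_neg hE, ih]

theorem pvCand1 (q : String) :
    ∀ (L : List (String × List (String × String))),
      ((L.filterMap (fun it => (pvKeyB q it.2).map (fun k => (k, it.1)))).filter
          (fun pr => decide ((ofLex pr.1).1 = 1)))
        = (L.filter (fun it => !pvExact q it.2 && pvSub q it.2)).map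
            (fun it => (toLex ((1:ℤ), pvKeyTail it.2), it.1)) := by
  intro L
  induction L with
  | nil => rfl
  | cons x xs ih =>
    by_cases hE : pvExact q x.2 = true
    · have hfx : Option.map (fun k => (k, x.1)) (pvKeyB q x.2)
          = some ((toLex ((0:ℤ), pvKeyTail x.2) : ℤ ×ₗ ℤ ×ₗ ℤ ×ₗ String), x.1) := by
        rw [pvKeyB_eq, if_pos hE]; rfl
      have hcons : List.filterMap (fun it => Option.map (fun k => (k, it.1)) (pvKeyB q it.2)) (x :: xs)
          = ((toLex ((0:ℤ), pvKeyTail x.2) : ℤ ×ₗ ℤ ×ₗ ℤ ×ₗ String), x.1)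
            :: List.filterMap (fun it => Option.map (fun k => (k, it.1)) (pvKeyB q it.2)) xs := by
        simp only [List.filterMap_cons, hfx]
      rw [hcons, List.filter_cons, List.filter_cons, if_neg (by simp), if_neg (by simp [hE]), ih]
    · by_cases hF : pvSub q x.2 = true
      · have hfx : Option.map (fun k => (k, x.1)) (pvKeyB q x.2)
            = some ((toLex ((1:ℤ), pvKeyTail x.2) : ℤ ×ₗ ℤ ×ₗ ℤ ×ₗ String), x.1) := by
          rw [pvKeyB_eq, if_neg hE, if_pos hF]; rfl
        have hcons : List.filterMap (fun it => Option.map (fun k => (k, it.1)) (pvKeyB q it.2)) (x :: xs)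
            = ((toLex ((1:ℤ), pvKeyTail x.2) : ℤ ×ₗ ℤ ×ₗ ℤ ×ₗ String), x.1)
              :: List.filterMap (fun it => Option.map (fun k => (k, it.1)) (pvKeyB q it.2)) xs := by
          simp only [List.filterMap_cons, hfx]
        rw [hcons, List.filter_cons, List.filter_cons, if_pos (by simp), if_pos (by simp [hE, hF]),
          List.map_cons, ih]
      · have hfx : Option.map (fun k => (k, x.1)) (pvKeyB q x.2) = none := by
          rw [pvKeyB_eq, if_neg hE, if_neg hF]; rfl
        have hcons : List.filterMap (fun it => Option.map (fun k => (k, it.1)) (pvKeyB q it.2)) (x :: xs)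
            = List.filterMap (fun it => Option.map (fun k => (k, it.1)) (pvKeyB q it.2)) xs := by
          simp only [List.filterMap_cons, hfx]
        rw [hcons, List.filter_cons, if_neg (by simp [hF]), ih]

theorem pvTier_mem (q : String) (L : List (String × List (String × String))) :
    ∀ pr ∈ L.filterMap (fun it => (pvKeyB q it.2).map (fun k => (k, it.1))),
      (ofLex pr.1).1 = 0 ∨ (ofLex pr.1).1 = 1 := by
  intro pr hpr
  rcases List.mem_filterMap.mp hpr with ⟨it, _, hit⟩
  rw [pvKeyB_eq] at hit
  split_ifs at hit with h1 h2
  · simp only [Option.map_some, Option.some.injEq] at hit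
    left; rw [← hit]; simp
  · simp only [Option.map_some, Option.some.injEq] at hit
    right; rw [← hit]; simp
  · simp at hit

theorem pvFoldl_insert_nodup :
    ∀ (l : List (List (String × String))) (d : PySem.Dict String (List (String × String))),
      d.keys.Nodup →
      (l.foldl (fun d node => d.insert (((PySem.Dict.mk node).get? "id").getD "") node) d).keys.Nodup := by
  intro l
  induction l with
  | nil => intro d hd; exact hd
  | cons x xs ih => intro d hd; exact ih _ (PySem.Dict.nodup_keys_insert d _ _ hd)

theorem pvNodeMap_nodup (graph : List (String × List (List (String × String)))) :
    (pvNodeMap graph).keys.Nodup :=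
  pvFoldl_insert_nodup _ _ PySem.Dict.nodup_keys_empty

-- _priority of a node id occurring in the map is the directly computed key tail
theorem pvPriorityA_of_items (graph : List (String × List (List (String × String))))
    {it : String × List (String × String)} (h : it ∈ (pvNodeMap graph).items) :
    pvPriorityA (pvNodeMap graph) it.1 = pvKeyTail it.2 := by
  have hg : (pvNodeMap graph).get? it.1 = some it.2 :=
    PySem.Dict.get?_of_mem_items _ h (pvNodeMap_nodup graph)
  unfold pvPriorityA pvKeyTail
  rw [hg]
  rfl

theorem pvStepB_eq (q : String) :
    pvStepB q = fun best it =>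
      ((pvKeyB q it.2).map (fun k => (k, it.1))).elim best (fun y => pvMinStep (Prod.fst) best y) := by
  funext best it
  cases hk : pvKeyB q it.2 with
  | none => simp only [pvStepB, hk, Option.map_none, Option.elim]
  | some k =>
    simp only [pvStepB, hk, Option.map_some, Option.elim]
    cases best with
    | none => rfl
    | some b => rfl

theorem resolve_node_ref_eq_alt (graph : List (String × List (List (String × String)))) (node_ref : String) :
    resolve_node_ref graph node_ref = resolve_node_ref_alt graph node_ref := by
  unfold resolve_node_ref resolve_node_ref_alt
  by_cases hc : (pvNodeMap graph).contains node_ref = true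
  · rw [if_pos hc, if_pos hc]
  · rw [if_neg hc, if_neg hc]
    set q := PySem.Str.strip (PySem.Str.lower node_ref) with hq
    set L := (pvNodeMap graph).items with hL
    have hB : L.foldl (pvStepB q) none
        = pvFmin Prod.fst (L.filterMap (fun it => (pvKeyB q it.2).map (fun k => (k, it.1)))) := by
      rw [pvStepB_eq q, pvFoldl_skip]
      rfl
    have hA := pvA_fold q L [] []
    simp only [List.nil_append] at hA
    have hA1 : (L.foldl (pvStepA q) ([], [])).1
        = (L.filter (fun it => pvExact q it.2)).map Prod.fst := by rw [hA]
    have hA2 : (L.foldl (pvStepA q) ([], [])).2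
        = (L.filter (fun it => !pvExact q it.2 && pvSub q it.2)).map Prod.fst := by rw [hA]
    have chain : ∀ (c : ℤ) (M : List (String × List (String × String))), (∀ x ∈ M, x ∈ L) →
        (pvFmin Prod.fst (M.map (fun it => (toLex (c, pvKeyTail it.2), it.1)))).map (fun b => b.2)
          = (PySem.List.sorted (M.map Prod.fst) (pvPriorityA (pvNodeMap graph))).head? := by
      intro c M hM
      rw [pvSorted_head, pvFmin_map, pvFmin_map, Option.map_map]
      rw [pvFmin_congr
            (fun it => Prod.fst ((fun it : String × List (String × String) =>
              ((toLex (c, pvKeyTail it.2) : ℤ ×ₗ ℤ ×ₗ ℤ ×ₗ String), it.1)) it))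
            (fun it : String × List (String × String) => pvPriorityA (pvNodeMap graph) (Prod.fst it)) M ?_]
      · rfl
      · intro a ha b hb
        have hpa : pvPriorityA (pvNodeMap graph) a.1 = pvKeyTail a.2 :=
          pvPriorityA_of_items graph (hL ▸ hM a ha)
        have hpb : pvPriorityA (pvNodeMap graph) b.1 = pvKeyTail b.2 :=
          pvPriorityA_of_items graph (hL ▸ hM b hb)
        simp only [hpa, hpb]
        rw [Prod.Lex.toLex_lt_toLex]
        simp
    rw [hA1, hA2, hB, pvTier_split_pair _ (pvTier_mem q L), pvCand0 q L, pvCand1 q L]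
    by_cases hM0 : (L.filter (fun it => pvExact q it.2)) = []
    · rw [hM0]
      simp only [List.map_nil]
      rw [if_pos trivial]
      rw [chain 1 _ (fun x hx => List.mem_of_mem_filter hx)]
      rw [show PySem.List.sorted ([] : List String) (pvPriorityA (pvNodeMap graph)) = [] from rfl]
      cases hs : PySem.List.sorted
          ((L.filter (fun it => !pvExact q it.2 && pvSub q it.2)).map Prod.fst)
          (pvPriorityA (pvNodeMap graph)) with
      | nil => simp
      | cons x t => simp
    · rw [if_neg (by simpa [List.map_eq_nil_iff] using hM0)]
      rw [chain 0 _ (fun x hx => List.mem_of_mem_filter hx)]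
      cases hs : PySem.List.sorted
          ((L.filter (fun it => pvExact q it.2)).map Prod.fst)
          (pvPriorityA (pvNodeMap graph)) with
      | nil =>
        exfalso
        rw [PySem.List.sorted_eq_nil_iff, List.map_eq_nil_iff] at hs
        exact hM0 hs
      | cons x t => simp

-- ===== VERDICT (by name: the statement is the Claim_ definition above) =====
theorem resolve_node_ref_spec : Claim_equal_resolve_node_ref := by
  intro graph node_ref _ _
  unfold Spec_resolve_node_ref
  exact resolve_node_ref_eq_alt graph node_ref
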